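-- pv_equiv track=rewrite | github.com/bugii/SME-Group1 | Python/Web Scraping/functions.py | create_timeline
-- ===== SOURCE A (Python) =====
-- def create_timeline(file_list, filename):
--     # Needs a list to iterate over. Every time it finds an entry starting with "filename", it iterates back to find the
--     # associated commit id and date. Outputs a list with the commit-date-tuples. Only functions with github logs.
--     output = []
--     for idx, element in enumerate(file_list):
--         if element.startswith(filename):
--             j=idx-1
--             while not file_list[j].startswith("Date: "):
--                 j-=1
--             k=j-1
--             while not file_list[k].startswith("commit "):
--                 k-=1
--             output.append((file_list[j], file_list[k]))
--     return output
-- ===== SOURCE B (Python) =====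
-- def create_timeline(file_list, filename):
--     # Single forward pass: remember the most recent commit line and, for the most
--     # recent "Date: " line, the (date, commit) pair it belongs to.
--     output = []
--     last_commit = ""
--     pair = ("", "")
--     for element in file_list:
--         if element.startswith(filename):
--             output.append(pair)
--         if element.startswith("Date: "):
--             pair = (element, last_commit)
--         if element.startswith("commit "):
--             last_commit = element
--     return output
-- ===== Notes on version B (the rewrite author's own statement) =====
-- stated objective: alternative
-- what changed: A re-scans backwards from every matching entry to find the nearest 'Date: ' and 'commit ' lines; B instead makes a single forward pass maintaining the last commit line and the (date, commit) pair of the last date line, so the inner backward scans disappear (not measurably faster on typical logs, where the scans are short).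
-- outside the precondition, e.g. on create_timeline(['Date: ', 'commit ', 'f'], 'f'): A returns [('Date: ', 'commit ')], B returns [('Date: ', '')]; on create_timeline(['f'], 'f'): A raises IndexError, B returns [('', '')]
import Mathlib
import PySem

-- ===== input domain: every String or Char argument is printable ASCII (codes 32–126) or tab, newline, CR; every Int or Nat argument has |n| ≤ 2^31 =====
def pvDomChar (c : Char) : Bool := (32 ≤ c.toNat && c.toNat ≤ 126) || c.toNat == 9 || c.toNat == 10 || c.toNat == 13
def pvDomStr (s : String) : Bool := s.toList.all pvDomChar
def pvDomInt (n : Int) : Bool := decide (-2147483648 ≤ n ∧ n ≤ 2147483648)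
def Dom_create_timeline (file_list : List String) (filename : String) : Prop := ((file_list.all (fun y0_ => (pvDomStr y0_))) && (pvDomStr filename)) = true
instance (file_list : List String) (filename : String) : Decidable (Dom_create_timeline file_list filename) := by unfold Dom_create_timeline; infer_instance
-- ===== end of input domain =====

-- B replaces A's per-match backward scans by a single forward pass that tracks the
-- most recent commit line and the (date, commit) pair of the most recent date line
-- (objective: alternative — one forward pass instead of backward scans per match).


-- ===== PORT A =====
-- the backward `while not file_list[j].startswith(pref): j -= 1` loop; pyGet? = none is
-- Python's IndexError (outside Pre_), negative j wraps from the end exactly as in Python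
def scanBack (l : List String) (pref : String) (j : Int) : Option Int :=
  match h : PySem.List.pyGet? l j with
  | none => none
  | some s => if PySem.Str.startswith s pref then some j else scanBack l pref (j - 1)
termination_by (j + l.length + 1).toNat
decreasing_by
  have : PySem.Raise.InRange l.length j := by
    by_contra hc
    rw [← PySem.List.pyGet?_eq_none_iff] at hc
    simp [hc] at h
  unfold PySem.Raise.InRange at this
  omega

def create_timeline (file_list : List String) (filename : String) : List (String × String) :=
  (PySem.List.enumerate file_list 0).foldl (fun output p =>
    if PySem.Str.startswith p.2 filename then
      match scanBack file_list "Date: " (p.1 - 1) with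
      | none => output
      | some j =>
        match scanBack file_list "commit " (j - 1) with
        | none => output
        | some k =>
          output ++ [((PySem.List.pyGet? file_list j).getD "",
                      (PySem.List.pyGet? file_list k).getD "")]
    else output) []

-- ===== PORT B =====
-- state = (last_commit, pair, output); B's three sequential `if`s all read the OLD state
-- (output is appended before pair is updated, pair before last_commit), so one tuple step
def ctB_step (filename : String)
    (st : String × (String × String) × List (String × String)) (element : String) :
    String × (String × String) × List (String × String) :=
  (if PySem.Str.startswith element "commit " then element else st.1,
   if PySem.Str.startswith element "Date: " then (element, st.1) else st.2.1,
   if PySem.Str.startswith element filename then st.2.2 ++ [st.2.1] else st.2.2)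

def create_timeline_alt (file_list : List String) (filename : String) : List (String × String) :=
  (file_list.foldl (ctB_step filename) ("", ("", ""), [])).2.2

-- ===== PRECONDITION & SPEC =====
-- Pre_ excludes inputs on which Python A either raises IndexError or pairs a match via
-- negative-index WRAPAROUND (no "Date: " line above a matching entry, or no "commit "
-- line above its nearest "Date: " line — malformed git logs): B's forward pass has no
-- wraparound and Python B appends a placeholder pair there.
def Pre_create_timeline (file_list : List String) (filename : String) : Prop :=
  ∀ i : Nat, i < file_list.length →
    PySem.Str.startswith (file_list.getD i "") filename = true →
    ∃ j : Nat, j < i ∧ PySem.Str.startswith (file_list.getD j "") "Date: " = true ∧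
      ∃ k : Nat, k < j ∧ PySem.Str.startswith (file_list.getD k "") "commit " = true

instance (file_list : List String) (filename : String) :
    Decidable (Pre_create_timeline file_list filename) := by
  unfold Pre_create_timeline; infer_instance

def pvWitness_create_timeline : List String × String :=
  (["commit a", "Date: b", "f"], "f")

def Spec_create_timeline (file_list : List String) (filename : String) (out : List (String × String)) : Prop := out = create_timeline_alt file_list filename
instance (file_list : List String) (filename : String) (out : List (String × String)) : Decidable (Spec_create_timeline file_list filename out) := by unfold Spec_create_timeline; infer_instance

-- ===== CLAIM (what is proved, stated in full; the proofs are below) =====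
def Claim_equal_create_timeline : Prop := ∀ (file_list : List String) (filename : String), Dom_create_timeline file_list filename → Pre_create_timeline file_list filename → Spec_create_timeline file_list filename (create_timeline file_list filename)

-- ===== LEMMAS AND PROOFS =====

-- index of the last element strictly before position n starting with pref
def lastHit (l : List String) (pref : String) : Nat → Option Nat
  | 0 => none
  | n + 1 =>
    if PySem.Str.startswith (l.getD n "") pref then some n else lastHit l pref n

-- value of B's last_commit after the first n elements
def lcAt (l : List String) (n : Nat) : String :=
  match lastHit l "commit " n with
  | none => ""
  | some k => l.getD k ""

-- value of B's pair after the first n elements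
def pairAt (l : List String) (n : Nat) : String × String :=
  match lastHit l "Date: " n with
  | none => ("", "")
  | some j => (l.getD j "", lcAt l j)

-- output accumulated after the first n elements
def outsAt (l : List String) (fn : String) : Nat → List (String × String)
  | 0 => []
  | n + 1 =>
    outsAt l fn n ++
      (if PySem.Str.startswith (l.getD n "") fn then [pairAt l n] else [])

lemma lastHit_lt_of_eq_some {l : List String} {p : String} {n j : Nat}
    (h : lastHit l p n = some j) :
    j < n ∧ PySem.Str.startswith (l.getD j "") p = true := by
  induction n with
  | zero => simp [lastHit] at h
  | succ n ih =>
    simp only [lastHit] at h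
    split_ifs at h with hp
    · injection h with h
      subst h
      exact ⟨Nat.lt_succ_self n, hp⟩
    · obtain ⟨hj, hs⟩ := ih h
      exact ⟨Nat.lt_succ_of_lt hj, hs⟩

lemma lastHit_ge {l : List String} {p : String} {n j : Nat}
    (hj : j < n) (hs : PySem.Str.startswith (l.getD j "") p = true) :
    ∃ j', lastHit l p n = some j' ∧ j ≤ j' := by
  induction n with
  | zero => omega
  | succ n ih =>
    by_cases hp : PySem.Str.startswith (l.getD n "") p = true
    · exact ⟨n, by simp only [lastHit]; rw [if_pos hp], by omega⟩
    · have hjn : j < n := by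
        rcases Nat.lt_succ_iff_lt_or_eq.mp hj with h | h
        · exact h
        · subst h; exact absurd hs hp
      obtain ⟨j', h1, h2⟩ := ih hjn
      exact ⟨j', by simp only [lastHit]; rw [if_neg hp]; exact h1, h2⟩

-- one unfolding step of A's backward scan at an in-range non-negative index
lemma scanBack_nat (l : List String) (p : String) (n : Nat) (hn : n < l.length) :
    scanBack l p (n : Int) =
      if PySem.Str.startswith (l.getD n "") p then some (n : Int)
      else scanBack l p ((n : Int) - 1) := by
  have hget : PySem.List.pyGet? l ((n : Int)) = some (l.getD n "") := by
    rw [PySem.List.pyGet?_natCast]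
    simp [List.getElem?_eq_getElem hn]
  rw [scanBack]
  split
  · rename_i heq
    rw [hget] at heq
    exact absurd heq (by simp)
  · rename_i s heq
    rw [hget] at heq
    injection heq with heq
    subst heq
    rfl

-- A's backward scan finds exactly the last hit before n, given one exists (no wraparound)
lemma scanBack_eq_lastHit {l : List String} {p : String} {n : Nat}
    (hn : n ≤ l.length)
    (hex : ∃ j : Nat, j < n ∧ PySem.Str.startswith (l.getD j "") p = true) :
    ∃ j₀ : Nat, lastHit l p n = some j₀ ∧ scanBack l p ((n : Int) - 1) = some (j₀ : Int) := by
  induction n with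
  | zero => obtain ⟨j, hj, _⟩ := hex; omega
  | succ n ih =>
    have hn' : n < l.length := hn
    have hcast : ((n + 1 : Nat) : Int) - 1 = (n : Int) := by push_cast; ring
    rw [hcast, scanBack_nat l p n hn']
    by_cases hp : PySem.Str.startswith (l.getD n "") p = true
    · refine ⟨n, ?_, ?_⟩
      · simp only [lastHit]; rw [if_pos hp]
      · rw [if_pos hp]
    · have hex' : ∃ j : Nat, j < n ∧ PySem.Str.startswith (l.getD j "") p = true := by
        obtain ⟨j, hj, hs⟩ := hex
        have : j ≠ n := fun h => hp (h ▸ hs)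
        exact ⟨j, by omega, hs⟩
      obtain ⟨j₀, h1, h2⟩ := ih (Nat.le_of_lt hn') hex'
      refine ⟨j₀, ?_, ?_⟩
      · simp only [lastHit]; rw [if_neg hp]; exact h1
      · rw [if_neg hp]; exact h2

-- B's loop invariant: state after the first n elements
lemma ctB_invariant (l : List String) (fn : String) (n : Nat) (hn : n ≤ l.length) :
    (l.take n).foldl (ctB_step fn) ("", ("", ""), []) = (lcAt l n, pairAt l n, outsAt l fn n) := by
  induction n with
  | zero => simp [lcAt, pairAt, outsAt, lastHit]
  | succ n ih =>
    have hn' : n < l.length := hn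
    rw [List.take_add_one, List.getElem?_eq_getElem hn']
    simp only [Option.toList_some, List.foldl_append, ih (Nat.le_of_lt hn'), List.foldl_cons,
      List.foldl_nil]
    have he : l[n] = l.getD n "" := (List.getD_eq_getElem l "" hn').symm
    unfold ctB_step
    simp only [he]
    refine Prod.ext ?_ (Prod.ext ?_ ?_)
    · show (if PySem.Str.startswith (l.getD n "") "commit " then l.getD n "" else lcAt l n)
        = lcAt l (n + 1)
      simp only [lcAt, lastHit]
      split_ifs <;> rfl
    · show (if PySem.Str.startswith (l.getD n "") "Date: " then (l.getD n "", lcAt l n)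
          else pairAt l n) = pairAt l (n + 1)
      simp only [pairAt, lcAt, lastHit]
      split_ifs <;> rfl
    · show (if PySem.Str.startswith (l.getD n "") fn then outsAt l fn n ++ [pairAt l n]
          else outsAt l fn n) = outsAt l fn (n + 1)
      simp only [outsAt]
      split_ifs <;> simp
-- A's loop invariant under Pre_: output after the first n indexed elements
lemma ctA_invariant (l : List String) (fn : String)
    (hpre : Pre_create_timeline l fn) (n : Nat) (hn : n ≤ l.length) :
    ((PySem.List.enumerate l 0).take n).foldl (fun output p =>
      if PySem.Str.startswith p.2 fn then
        match scanBack l "Date: " (p.1 - 1) with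
        | none => output
        | some j =>
          match scanBack l "commit " (j - 1) with
          | none => output
          | some k =>
            output ++ [((PySem.List.pyGet? l j).getD "", (PySem.List.pyGet? l k).getD "")]
      else output) [] = outsAt l fn n := by
  induction n with
  | zero => simp [outsAt]
  | succ n ih =>
    have hn' : n < l.length := hn
    have hlen : n < (PySem.List.enumerate l 0).length := by
      rw [PySem.List.length_enumerate]; exact hn'
    rw [List.take_add_one, List.getElem?_eq_getElem hlen]
    simp only [Option.toList_some, List.foldl_append, ih (Nat.le_of_lt hn'), List.foldl_cons,
      List.foldl_nil]
    rw [PySem.List.getElem_enumerate]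
    have he : l[n] = l.getD n "" := (List.getD_eq_getElem l "" hn').symm
    simp only [he, zero_add]
    by_cases hm : PySem.Str.startswith (l.getD n "") fn = true
    · -- matching entry: Pre_ supplies a date and a commit, so both scans succeed
      obtain ⟨j, hj, hdj, k, hk, hck⟩ := hpre n hn' hm
      obtain ⟨j₀, hlast, hscan⟩ := scanBack_eq_lastHit (Nat.le_of_lt hn') ⟨j, hj, hdj⟩
      have hjj₀ : j ≤ j₀ := by
        obtain ⟨j', h1, h2⟩ := lastHit_ge hj hdj
        rw [hlast] at h1; injection h1 with h1; omega
      have hj₀n : j₀ < n := (lastHit_lt_of_eq_some hlast).1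
      obtain ⟨k₀, hlastc, hscanc⟩ :=
        scanBack_eq_lastHit (l := l) (p := "commit ") (n := j₀)
          (by omega) ⟨k, by omega, hck⟩
      have hk₀ : k₀ < j₀ := (lastHit_lt_of_eq_some hlastc).1
      have hgj : (PySem.List.pyGet? l (j₀ : Int)).getD "" = l.getD j₀ "" := by
        rw [PySem.List.pyGet?_natCast]
        rw [List.getElem?_eq_getElem (show j₀ < l.length by omega)]
        exact (List.getD_eq_getElem l "" (show j₀ < l.length by omega)).symm
      have hgk : (PySem.List.pyGet? l (k₀ : Int)).getD "" = l.getD k₀ "" := by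
        rw [PySem.List.pyGet?_natCast]
        rw [List.getElem?_eq_getElem (show k₀ < l.length by omega)]
        exact (List.getD_eq_getElem l "" (show k₀ < l.length by omega)).symm
      rw [if_pos hm, hscan]
      simp only [hscanc, hgj, hgk]
      simp only [outsAt]
      rw [if_pos hm]
      simp only [pairAt, hlast, lcAt, hlastc]
    · rw [if_neg hm]
      simp only [outsAt]
      rw [if_neg hm]
      simp

-- ===== VERDICT (by name: the statement is the Claim_ definition above) =====
theorem create_timeline_spec : Claim_equal_create_timeline := by
  intro l fn _ hpre
  unfold Spec_create_timeline create_timeline create_timeline_alt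
  have hA := ctA_invariant l fn hpre l.length (le_refl _)
  have hB := ctB_invariant l fn l.length (le_refl _)
  rw [List.take_length] at hB
  rw [show (PySem.List.enumerate l 0).take l.length = PySem.List.enumerate l 0 by
        rw [← PySem.List.length_enumerate (xs := l) (s := 0), List.take_length]] at hA
  rw [hA, hB]
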